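-- pv_equiv track=rewrite | github.com/timnknu/ap2425_2k | 18_testing/t30_2_unittest_ex.py | t302_matrix_process
-- ===== SOURCE A (Python) =====
-- def t302_matrix_process(M):
--     "Ця функція приймає M -- матрицю як список списків"
--     sum_elements = 0
--     min_elem = None
--     max_elem = None
--     for row in M:
--         for el in row:
--             sum_elements += el
--             if min_elem is None or el < min_elem:
--                 min_elem = el
--             if max_elem is None or el > max_elem:
--                 max_elem = el
--     return sum_elements, min_elem, max_elem
-- ===== SOURCE B (Python) =====
-- def t302_matrix_process(M):
--     "Ця функція приймає M -- матрицю як список списків"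
--     flat = [el for row in M for el in row]
--     if not flat:
--         return 0, None, None
--     return _agg(flat)
--
-- def _agg(xs):
--     # divide-and-conquer tree reduction of (sum, min, max) summaries
--     if len(xs) == 1:
--         x = xs[0]
--         return x, x, x
--     mid = len(xs) // 2
--     s1, mn1, mx1 = _agg(xs[:mid])
--     s2, mn2, mx2 = _agg(xs[mid:])
--     return s1 + s2, min(mn1, mn2), max(mx1, mx2)
-- ===== Notes on version B (the rewrite author's own statement) =====
-- stated objective: alternative
-- what changed: Replaces A's single fused linear scan with three accumulators by a recursive divide-and-conquer tree reduction: the matrix is flattened, split in halves, each half's (sum, min, max) summary is computed recursively and the two summaries are merged.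
-- outside the precondition, e.g. on t302_matrix_process([[]]): A returns (0, None, None), B returns (0, None, None)
import Mathlib
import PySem

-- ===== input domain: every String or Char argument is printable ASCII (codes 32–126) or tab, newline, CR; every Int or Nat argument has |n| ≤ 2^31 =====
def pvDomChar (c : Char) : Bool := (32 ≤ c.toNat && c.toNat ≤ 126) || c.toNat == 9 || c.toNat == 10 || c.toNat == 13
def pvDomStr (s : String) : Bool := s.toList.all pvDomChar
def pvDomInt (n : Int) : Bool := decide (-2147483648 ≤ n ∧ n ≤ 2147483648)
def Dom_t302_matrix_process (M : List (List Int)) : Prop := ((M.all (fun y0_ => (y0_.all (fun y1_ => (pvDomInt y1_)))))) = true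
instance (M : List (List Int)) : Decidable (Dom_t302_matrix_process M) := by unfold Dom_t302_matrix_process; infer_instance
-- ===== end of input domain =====

-- B replaces A's single fused accumulator scan by a divide-and-conquer tree reduction of (sum,min,max) summaries; objective: alternative.
-- Pre_ excludes matrices with no elements, on which A returns (0, None, None) — None is not an Int, so the tuple leaves the declared type.


-- ===== PORT A =====
-- fused pass: (sum, min?, max?) state, min/max start as none (Python None);
-- the final .getD 0 only discharges the Option — Pre_ guarantees the state is some.
def t302_matrix_process (M : List (List Int)) : Int × Int × Int :=
  let s := M.foldl (fun st row =>
    row.foldl (fun (st : Int × Option Int × Option Int) el =>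
      ( st.1 + el
      , match st.2.1 with
        | none => some el
        | some m => if el < m then some el else some m
      , match st.2.2 with
        | none => some el
        | some m => if el > m then some el else some m )) st) (0, none, none)
  (s.1, s.2.1.getD 0, s.2.2.getD 0)

-- ===== PORT B =====
-- _agg: recursive divide-and-conquer on a nonempty list (Python's _agg; the [] case is unreachable there,
-- the Lean equation for [] only makes the function total)
def pvAgg : List Int → Int × Int × Int
  | [] => (0, 0, 0)        -- unreachable: _agg is only called on nonempty lists
  | [x] => (x, x, x)
  | x :: y :: rest =>
    let l := x :: y :: rest
    let mid := l.length / 2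
    let p1 := pvAgg (l.take mid)
    let p2 := pvAgg (l.drop mid)
    (p1.1 + p2.1, min p1.2.1 p2.2.1, max p1.2.2 p2.2.2)
termination_by l => l.length
decreasing_by
  · simp [List.length_take]; omega
  · simp; omega

-- flatten; the empty case returns Python's (0, None, None), rendered with 0s (excluded by Pre_)
def t302_matrix_process_alt (M : List (List Int)) : Int × Int × Int :=
  let flat := M.flatMap id
  if flat = [] then (0, 0, 0) else pvAgg flat

-- ===== PRECONDITION & SPEC =====
-- Pre_ excludes element-free matrices: there A returns (0, None, None), which is not of type Int × Int × Int.
def Pre_t302_matrix_process (M : List (List Int)) : Prop := M.flatMap id ≠ []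
instance (M : List (List Int)) : Decidable (Pre_t302_matrix_process M) := by unfold Pre_t302_matrix_process; infer_instance
def pvWitness_t302_matrix_process : List (List Int) := [[1, 2], [3]]
def Spec_t302_matrix_process (M : List (List Int)) (out : Int × Int × Int) : Prop := out = t302_matrix_process_alt M
instance (M : List (List Int)) (out : Int × Int × Int) : Decidable (Spec_t302_matrix_process M out) := by unfold Spec_t302_matrix_process; infer_instance

-- ===== CLAIM (what is proved, stated in full; the proofs are below) =====
def Claim_equal_t302_matrix_process : Prop := ∀ (M : List (List Int)), Dom_t302_matrix_process M → Pre_t302_matrix_process M → Spec_t302_matrix_process M (t302_matrix_process M)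

-- ===== LEMMAS AND PROOFS =====

-- the (sum, running-min, running-max) summary of a nonempty list x :: t
def pvSummary : List Int → Int × Int × Int
  | [] => (0, 0, 0)
  | x :: t => (x + t.sum, t.foldl min x, t.foldl max x)

lemma foldl_min_pull (u : List Int) : ∀ c y : Int, u.foldl min (min c y) = min c (u.foldl min y) := by
  induction u with
  | nil => intro c y; rfl
  | cons z u ih =>
    intro c y
    simp only [List.foldl_cons]
    rw [min_assoc, ih]

lemma foldl_max_pull (u : List Int) : ∀ c y : Int, u.foldl max (max c y) = max c (u.foldl max y) := by
  induction u with
  | nil => intro c y; rfl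
  | cons z u ih =>
    intro c y
    simp only [List.foldl_cons]
    rw [max_assoc, ih]

-- merging the summaries of two nonempty halves gives the summary of the whole
lemma pvSummary_append (a b : List Int) (ha : a ≠ []) (hb : b ≠ []) :
    pvSummary (a ++ b) =
      ((pvSummary a).1 + (pvSummary b).1,
       min (pvSummary a).2.1 (pvSummary b).2.1,
       max (pvSummary a).2.2 (pvSummary b).2.2) := by
  obtain ⟨x, t, rfl⟩ := List.exists_cons_of_ne_nil ha
  obtain ⟨y, u, rfl⟩ := List.exists_cons_of_ne_nil hb
  simp only [pvSummary, List.cons_append, List.sum_append, List.sum_cons, List.foldl_append,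
    List.foldl_cons, foldl_min_pull, foldl_max_pull]
  rw [add_assoc]

-- pvAgg computes exactly the summary of its (nonempty) argument
lemma pvAgg_eq_summary : ∀ l : List Int, l ≠ [] → pvAgg l = pvSummary l := by
  intro l
  induction l using pvAgg.induct with
  | case1 => intro h; exact absurd rfl h
  | case2 x => intro _; simp [pvAgg, pvSummary]
  | case3 x y rest _ _ ih1 ih2 =>
    intro _
    rw [pvAgg]
    have hlen : (x :: y :: rest).length / 2 ≥ 1 ∧ (x :: y :: rest).length / 2 < (x :: y :: rest).length := by
      simp; omega
    have hta : (x :: y :: rest).take ((x :: y :: rest).length / 2) ≠ [] := by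
      intro h
      have := congrArg List.length h
      simp [List.length_take] at this
    have htb : (x :: y :: rest).drop ((x :: y :: rest).length / 2) ≠ [] := by
      intro h
      have := congrArg List.length h
      simp at this
      omega
    rw [ih1 hta, ih2 htb]
    have := pvSummary_append _ _ hta htb
    rw [List.take_append_drop] at this
    rw [this]

-- invariant of A's fused loop once the min/max state is `some`
lemma t302_fold_inv (t : List Int) (a m M : Int) :
    t.foldl (fun (st : Int × Option Int × Option Int) el =>
      ( st.1 + el
      , match st.2.1 with
        | none => some el
        | some m => if el < m then some el else some m
      , match st.2.2 with
        | none => some el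
        | some m => if el > m then some el else some m )) (a, some m, some M)
    = (a + t.sum, some (t.foldl min m), some (t.foldl max M)) := by
  induction t generalizing a m M with
  | nil => simp
  | cons x t ih =>
    simp only [List.foldl_cons, List.sum_cons]
    have h1 : (if x < m then some x else some m) = some (min m x) := by
      by_cases h : x < m <;> simp_all [min_def]
    have h2 : (if x > M then some x else some M) = some (max M x) := by
      by_cases h : x > M <;> simp_all [max_def] <;> omega
    rw [h1, h2, ih]; ring_nf

lemma t302_fold_char (x : Int) (t : List Int) :
    (x :: t).foldl (fun (st : Int × Option Int × Option Int) el =>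
      ( st.1 + el
      , match st.2.1 with
        | none => some el
        | some m => if el < m then some el else some m
      , match st.2.2 with
        | none => some el
        | some m => if el > m then some el else some m )) (0, none, none)
    = ((x :: t).sum, some (t.foldl min x), some (t.foldl max x)) := by
  simp only [List.foldl_cons, List.sum_cons, t302_fold_inv]
  norm_num

-- ===== VERDICT (by name: the statement is the Claim_ definition above) =====
theorem t302_matrix_process_spec : Claim_equal_t302_matrix_process := by
  intro M _ hpre
  unfold Spec_t302_matrix_process t302_matrix_process t302_matrix_process_alt
  have hflat : M.foldl (fun st row =>
      row.foldl (fun (st : Int × Option Int × Option Int) el =>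
        ( st.1 + el
        , match st.2.1 with
          | none => some el
          | some m => if el < m then some el else some m
        , match st.2.2 with
          | none => some el
          | some m => if el > m then some el else some m )) st) (0, none, none)
      = (M.flatMap id).foldl (fun (st : Int × Option Int × Option Int) el =>
        ( st.1 + el
        , match st.2.1 with
          | none => some el
          | some m => if el < m then some el else some m
        , match st.2.2 with
          | none => some el
          | some m => if el > m then some el else some m )) (0, none, none) := by
    rw [List.flatMap_id, List.foldl_flatten]
  simp only [hflat, if_neg hpre]
  rw [pvAgg_eq_summary _ hpre]
  obtain ⟨x, t, hxt⟩ := List.exists_cons_of_ne_nil hpre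
  rw [hxt, t302_fold_char]
  simp [pvSummary]
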